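-- pv_equiv track=rewrite | github.com/tos-kamiya/d2vg | d2vg/init_attrs_with_kwargs/__init__.py | _convert_option_name_to_attr_name
-- ===== SOURCE A (Python) =====
-- def _convert_option_name_to_attr_name(name: str) -> str:
--     if name.startswith('--'):
--         ns = name[2:]
--     elif name.startswith('-'):
--         ns = name[1:]
--     elif name.startswith('<') and name.endswith('>'):
--         ns = name[1:-1]
--     else:
--         ns = name
--     ns = ns.replace('-', '_')
--
--     if not(len(ns) > 0 and ('a' <= ns[0] <= 'z' or 'A' <= ns[0] <= 'Z') and \
--             all('a' <= c <= 'z' or 'A' <= c <= 'Z' or '0' <= c <= '9' or c == '_' for c in ns)):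
--         raise NameError("Invalid name for option or positional argument: %s" % repr(name))
--
--     return ns
-- ===== SOURCE B (Python) =====
-- import re
--
-- # One combined regex: fullmatch strips the prefix form and validates in a single
-- # alternation; dashes in the captured identifier are then mapped to underscores.
-- _ID = r'[A-Za-z][A-Za-z0-9_-]*'
-- _NAME_RE = re.compile(r'--(%s)|-(%s)|<(%s)>|(%s)' % (_ID, _ID, _ID, _ID))
--
--
-- def _convert_option_name_to_attr_name(name: str) -> str:
--     m = _NAME_RE.fullmatch(name)
--     if m is None:
--         raise NameError("Invalid name for option or positional argument: %s" % repr(name))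
--     ns = next(g for g in m.groups() if g is not None)
--     return ''.join('_' if c == '-' else c for c in ns)
-- ===== Notes on version B (the rewrite author's own statement) =====
-- stated objective: idiomatic
-- what changed: A's if/elif prefix stripping followed by an explicit len/first-char/all(...) character loop is replaced by a single compiled regex fullmatch whose alternation strips the prefix and validates in one step, with the dash-to-underscore rewrite done on the captured group via a join.
import Mathlib
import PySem

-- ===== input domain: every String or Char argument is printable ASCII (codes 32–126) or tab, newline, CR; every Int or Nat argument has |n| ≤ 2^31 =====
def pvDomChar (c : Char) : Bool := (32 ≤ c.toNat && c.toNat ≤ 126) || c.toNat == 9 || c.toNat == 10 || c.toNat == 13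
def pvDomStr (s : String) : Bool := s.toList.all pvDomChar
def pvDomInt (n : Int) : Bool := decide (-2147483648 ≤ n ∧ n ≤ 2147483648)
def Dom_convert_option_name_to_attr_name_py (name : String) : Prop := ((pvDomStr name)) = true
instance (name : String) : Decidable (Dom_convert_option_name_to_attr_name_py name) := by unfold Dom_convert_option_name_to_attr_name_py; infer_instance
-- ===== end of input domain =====

-- B replaces A's if/elif prefix stripping plus char-by-char validation loop with a single
-- combined regex fullmatch (strip + validate in one alternation) and a join over the capture
-- (objective: idiomatic; same cost).

-- ===== PORT A =====
def pyLetterA (c : Char) : Bool := ('a' ≤ c && c ≤ 'z') || ('A' ≤ c && c ≤ 'Z')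
def pyBodyA (c : Char) : Bool := ('a' ≤ c && c ≤ 'z') || ('A' ≤ c && c ≤ 'Z') || ('0' ≤ c && c ≤ '9') || c == '_'

def convert_option_name_to_attr_name_py (name : String) : String :=
  let cs := name.toList
  let ns :=
    if PySem.Chars.startswith cs ['-', '-'] then PySem.List.slice cs (some 2) none
    else if PySem.Chars.startswith cs ['-'] then PySem.List.slice cs (some 1) none
    else if PySem.Chars.startswith cs ['<'] && PySem.Chars.endswith cs ['>'] then
      PySem.List.slice cs (some 1) (some (-1))
    else cs
  let ns2 := PySem.Chars.replace ns ['-'] ['_']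
  -- the failing check raises NameError in Python (those inputs are outside Pre_); "" stands for the raise
  if 0 < ns2.length && (match ns2[0]? with | some c => pyLetterA c | none => false) && ns2.all pyBodyA
  then String.ofList ns2 else ""

-- ===== PORT B =====
def pyLetterB (c : Char) : Bool := ('A' ≤ c && c ≤ 'Z') || ('a' ≤ c && c ≤ 'z')
def pyClassB (c : Char) : Bool := pyLetterB c || ('0' ≤ c && c ≤ '9') || c == '_' || c == '-'

-- fullmatch of _ID = [A-Za-z][A-Za-z0-9_-]*
def pyIdentB (cs : List Char) : Bool :=
  match cs with
  | [] => false
  | c :: rest => pyLetterB c && rest.all pyClassB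

-- fullmatch of r'--(_ID)|-(_ID)|<(_ID)>|(_ID)': top-level alternation, alternatives tried
-- left to right, result = the captured group.  Exact: the '<(_ID)>' alternative matches iff
-- the string is '<' ++ mid ++ '>' with mid a full _ID-match ('>' is not in the class, and a
-- failed earlier alternative cannot be rescued by backtracking since _ID never starts with
-- '-' or '<').
def pyMatchB (cs : List Char) : Option (List Char) :=
  if cs.take 2 = ['-', '-'] && pyIdentB (cs.drop 2) then some (cs.drop 2)
  else if cs.take 1 = ['-'] && pyIdentB (cs.drop 1) then some (cs.drop 1)
  else if cs.take 1 = ['<'] && cs.getLast? == some '>' && pyIdentB ((cs.drop 1).dropLast) then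
    some ((cs.drop 1).dropLast)
  else if pyIdentB cs then some cs else none

def convert_option_name_to_attr_name_py_alt (name : String) : String :=
  match pyMatchB name.toList with
  | some g => String.ofList (g.map (fun c => if c == '-' then '_' else c))  -- ''.join('_' if c == '-' else c for c in ns)
  | none => ""  -- NameError (outside Pre_)

-- ===== PRECONDITION & SPEC =====
-- Pre_ admits exactly the inputs on which A returns instead of raising NameError:
-- name is of the shape '--x', '-x', '<x>' or plain 'x' where x (with '-' read as '_')
-- is a nonempty ASCII identifier [A-Za-z][A-Za-z0-9_-]*.
def pvStrip (cs : List Char) : List Char :=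
  if cs.take 2 = ['-', '-'] then cs.drop 2
  else if cs.take 1 = ['-'] then cs.drop 1
  else if cs.take 1 = ['<'] && cs.getLast? == some '>' then (cs.drop 1).dropLast
  else cs

def pvOk (cs : List Char) : Bool :=
  match pvStrip cs with
  | [] => false
  | c :: rest =>
    (('A' ≤ c && c ≤ 'Z') || ('a' ≤ c && c ≤ 'z')) &&
      rest.all (fun d => ('A' ≤ d && d ≤ 'Z') || ('a' ≤ d && d ≤ 'z') || ('0' ≤ d && d ≤ '9') || d == '_' || d == '-')

def Pre_convert_option_name_to_attr_name_py (name : String) : Prop := pvOk name.toList = true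
instance (name : String) : Decidable (Pre_convert_option_name_to_attr_name_py name) := by
  unfold Pre_convert_option_name_to_attr_name_py; infer_instance

def pvWitness_convert_option_name_to_attr_name_py : String := "--foo-bar"

def Spec_convert_option_name_to_attr_name_py (name : String) (out : String) : Prop :=
  out = convert_option_name_to_attr_name_py_alt name
instance (name : String) (out : String) : Decidable (Spec_convert_option_name_to_attr_name_py name out) := by
  unfold Spec_convert_option_name_to_attr_name_py; infer_instance

-- ===== CLAIM (what is proved, stated in full; the proofs are below) =====
def Claim_equal_convert_option_name_to_attr_name_py : Prop :=
  ∀ (name : String), Dom_convert_option_name_to_attr_name_py name →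
    Pre_convert_option_name_to_attr_name_py name →
    Spec_convert_option_name_to_attr_name_py name (convert_option_name_to_attr_name_py name)

-- ===== LEMMAS AND PROOFS =====

def pvMapRepl (cs : List Char) : List Char := cs.map (fun c => if c == '-' then '_' else c)

theorem replace_go_dash (fuel : Nat) : ∀ (l acc : List Char), l.length ≤ fuel →
    PySem.Chars.replace.go ['-'] ['_'] fuel l acc = acc.reverse ++ pvMapRepl l := by
  induction fuel with
  | zero =>
    intro l acc h
    have : l = [] := List.eq_nil_of_length_eq_zero (Nat.le_zero.mp h)
    subst this
    simp [PySem.Chars.replace.go, pvMapRepl]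
  | succ n ih =>
    intro l acc h
    cases l with
    | nil => simp [PySem.Chars.replace.go, pvMapRepl]
    | cons c t =>
      by_cases hc : c = '-'
      · subst hc
        have hpre : List.isPrefixOf ['-'] ('-' :: t) = true := by
          simp [List.isPrefixOf]
        rw [PySem.Chars.replace.go]
        simp only [hpre, if_pos, List.length_cons, List.length_nil, List.drop_succ_cons,
          List.drop_zero, List.reverse_cons, List.reverse_nil, List.nil_append]
        rw [ih t _ (by simpa using Nat.le_of_succ_le_succ h)]
        simp [pvMapRepl]
      · have hpre : List.isPrefixOf ['-'] (c :: t) = false := by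
          simp only [List.isPrefixOf, Bool.and_eq_false_iff, beq_eq_false_iff_ne, ne_eq]
          exact Or.inl (fun h => hc h.symm)
        rw [PySem.Chars.replace.go]
        simp only [hpre]
        rw [if_neg (by simp), ih t _ (by simpa using Nat.le_of_succ_le_succ h)]
        simp [pvMapRepl, hc]

theorem replace_dash (cs : List Char) :
    PySem.Chars.replace cs ['-'] ['_'] = pvMapRepl cs := by
  rw [PySem.Chars.replace, if_neg (by simp)]
  simpa using replace_go_dash cs.length cs [] le_rfl

theorem pvOk_eq (cs : List Char) : pvOk cs = pyIdentB (pvStrip cs) := by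
  rw [pvOk]
  cases h : pvStrip cs with
  | nil => rfl
  | cons c r => rfl

theorem startswith_eq_take (cs p : List Char) :
    PySem.Chars.startswith cs p = decide (cs.take p.length = p) := by
  rw [Bool.eq_iff_iff, PySem.Chars.startswith_iff, decide_eq_true_iff, List.prefix_iff_eq_take]
  constructor <;> (intro h; exact h.symm)

theorem endswith_gt (cs : List Char) :
    PySem.Chars.endswith cs ['>'] = (cs.getLast? == some '>') := by
  rw [Bool.eq_iff_iff, PySem.Chars.endswith_iff, beq_iff_eq, List.getLast?_eq_some_iff]
  constructor
  · rintro ⟨ys, rfl⟩; exact ⟨ys, rfl⟩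
  · rintro ⟨ys, rfl⟩; exact ⟨ys, rfl⟩

theorem stripA_eq (cs : List Char) :
    (if PySem.Chars.startswith cs ['-', '-'] then PySem.List.slice cs (some 2) none
     else if PySem.Chars.startswith cs ['-'] then PySem.List.slice cs (some 1) none
     else if PySem.Chars.startswith cs ['<'] && PySem.Chars.endswith cs ['>'] then
       PySem.List.slice cs (some 1) (some (-1))
     else cs) = pvStrip cs := by
  rw [pvStrip, startswith_eq_take cs ['-', '-'], startswith_eq_take cs ['-'],
    startswith_eq_take cs ['<'], endswith_gt]
  simp only [List.length_cons, List.length_nil, Nat.zero_add, Nat.reduceAdd]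
  by_cases h1 : cs.take 2 = ['-', '-']
  · simp only [h1, decide_true, if_true]
    rw [PySem.List.slice_from cs (by norm_num)]
    rfl
  · simp only [h1, decide_false, Bool.false_eq_true, if_false]
    by_cases h2 : cs.take 1 = ['-']
    · simp only [h2, decide_true, if_true]
      rw [PySem.List.slice_from cs (by norm_num)]
      rfl
    · simp only [h2, decide_false, Bool.false_eq_true, if_false]
      by_cases h3a : cs.take 1 = ['<']
      · by_cases h3b : cs.getLast? = some '>'
        · simp only [h3a, h3b, decide_true, beq_self_eq_true, Bool.and_true, if_true]
          -- the branch implies cs has length ≥ 2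
          have hlen : 2 ≤ cs.length := by
            cases cs with
            | nil => simp at h3a
            | cons a t =>
              cases t with
              | nil =>
                simp [List.take] at h3a h3b
                subst h3a; simp at h3b
              | cons b u => simp
          have hc1 : PySem.List.clampIdx cs.length 1 = 1 := by
            have h := PySem.List.clampIdx_natCast cs.length 1
            rw [Nat.cast_one] at h
            rw [h]
            omega
          simp only [PySem.List.slice, PySem.List.clampIdx_neg_one, hc1]
          simp [List.dropLast_eq_take]
        · have hcond : (decide (cs.take 1 = ['<']) && cs.getLast? == some '>') = false := by
            simp [h3b]
          simp [hcond]
      · have hcond : (decide (cs.take 1 = ['<']) && cs.getLast? == some '>') = false := by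
          simp [h3a]
        simp [hcond]

theorem letterB_ne_dash (c : Char) (h : pyLetterB c = true) : ¬ c = '-' := by
  intro e; subst e; exact absurd h (by decide)

theorem classB_to_bodyA (d : Char) (hd : pyClassB d = true) :
    pyBodyA (if d == '-' then '_' else d) = true := by
  by_cases e : d = '-'
  · subst e; decide
  · rw [if_neg (by simpa using e)]
    simp only [pyClassB, pyLetterB, pyBodyA, Bool.or_eq_true, Bool.and_eq_true,
      beq_iff_eq] at hd ⊢
    tauto

theorem checkA (s : List Char) (h : pyIdentB s = true) :
    (0 < (pvMapRepl s).length &&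
      (match (pvMapRepl s)[0]? with | some c => pyLetterA c | none => false) &&
      (pvMapRepl s).all pyBodyA) = true := by
  cases s with
  | nil => simp [pyIdentB] at h
  | cons c r =>
    simp only [pyIdentB, Bool.and_eq_true] at h
    obtain ⟨hc, hr⟩ := h
    have hcne : ¬ c = '-' := letterB_ne_dash c hc
    have hfc : (if c == '-' then '_' else c) = c := by rw [if_neg (by simpa using hcne)]
    simp only [pvMapRepl, List.map_cons, List.length_cons, List.getElem?_cons_zero,
      Nat.zero_lt_succ, decide_true, Bool.true_and, List.all_cons, hfc, Bool.and_eq_true]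
    refine ⟨?_, ?_, ?_⟩
    · simp only [pyLetterA]
      simp only [pyLetterB, Bool.or_eq_true] at hc
      rcases hc with hA | ha
      · simp [hA]
      · simp [ha]
    · have hb := classB_to_bodyA c (by simp [pyClassB, hc])
      rwa [hfc] at hb
    · rw [List.all_map, List.all_eq_true]
      rw [List.all_eq_true] at hr
      intro d hd
      exact classB_to_bodyA d (hr d hd)

theorem matchB_eq (cs : List Char) (h : pyIdentB (pvStrip cs) = true) :
    pyMatchB cs = some (pvStrip cs) := by
  rw [pyMatchB, pvStrip]
  rw [pvStrip] at h
  by_cases h1 : cs.take 2 = ['-', '-']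
  · rw [if_pos h1] at h
    rw [if_pos (show (decide (cs.take 2 = ['-', '-']) && pyIdentB (cs.drop 2)) = true by
      simp only [h1, decide_true, Bool.true_and]; exact h), if_pos h1]
  · rw [if_neg h1] at h
    have n1 : ¬ (decide (cs.take 2 = ['-', '-']) && pyIdentB (cs.drop 2)) = true := by
      simp [h1]
    rw [if_neg n1, if_neg h1]
    by_cases h2 : cs.take 1 = ['-']
    · rw [if_pos h2] at h
      rw [if_pos (show (decide (cs.take 1 = ['-']) && pyIdentB (cs.drop 1)) = true by
        simp only [h2, decide_true, Bool.true_and]; exact h), if_pos h2]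
    · rw [if_neg h2] at h
      have n2 : ¬ (decide (cs.take 1 = ['-']) && pyIdentB (cs.drop 1)) = true := by
        simp [h2]
      rw [if_neg n2, if_neg h2]
      by_cases h3 : cs.take 1 = ['<'] ∧ cs.getLast? = some '>'
      · have h3' : (decide (cs.take 1 = ['<']) && cs.getLast? == some '>') = true := by
          simp [h3.1, h3.2]
        rw [if_pos h3'] at h
        rw [if_pos (show ((decide (cs.take 1 = ['<']) && cs.getLast? == some '>') &&
            pyIdentB ((cs.drop 1).dropLast)) = true by
          simp only [h3', Bool.true_and]; exact h), if_pos h3']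
      · have h3' : ¬ (decide (cs.take 1 = ['<']) && cs.getLast? == some '>') = true := by
          intro hh
          simp only [Bool.and_eq_true, decide_eq_true_eq, beq_iff_eq] at hh
          exact h3 hh
        rw [if_neg h3'] at h
        have n3 : ¬ ((decide (cs.take 1 = ['<']) && cs.getLast? == some '>') &&
            pyIdentB ((cs.drop 1).dropLast)) = true := by
          intro hh
          simp only [Bool.and_eq_true, decide_eq_true_eq, beq_iff_eq] at hh
          exact h3 ⟨hh.1.1, hh.1.2⟩
        rw [if_neg n3, if_neg h3', if_pos h]

theorem main_eq (name : String) (h : pvOk name.toList = true) :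
    convert_option_name_to_attr_name_py name = convert_option_name_to_attr_name_py_alt name := by
  rw [pvOk_eq] at h
  rw [convert_option_name_to_attr_name_py, convert_option_name_to_attr_name_py_alt]
  simp only [stripA_eq, replace_dash, matchB_eq _ h]
  rw [if_pos (checkA _ h)]
  rfl

-- ===== VERDICT =====
theorem convert_option_name_to_attr_name_py_spec : Claim_equal_convert_option_name_to_attr_name_py := by
  intro name _ hpre
  unfold Spec_convert_option_name_to_attr_name_py
  exact main_eq name hpre
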